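-- pv_equiv track=rewrite | github.com/aaaaaaaahhhhhhhh/AdventOfCode | day2/workings/part2test.py | deccending
-- ===== SOURCE A (Python) =====
-- def deccending(values):
--     new_list = values[:]
--     i = 0
--     error = 0
--     while i < len(new_list)-1:
--         if new_list[i] > new_list[i+1]:
--             i += 1
--         else:
--             new_list.pop(i)
--             if i > 0:
--                 i -= 1
--             error += 1
--     return error
-- ===== SOURCE B (Python) =====
-- def deccending(values):
--     stack = []
--     error = 0
--     for v in values:
--         while stack and stack[-1] <= v:
--             stack.pop()
--             error += 1
--         stack.append(v)
--     return error
-- ===== Notes on version B (the rewrite author's own statement) =====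
-- stated objective: faster
-- what changed: Replaces A's quadratic scan-with-backtracking over a mutable copy (pop at i, step back) by a single left-to-right pass maintaining a stack, counting pops while the top is <= the current element.
import Mathlib
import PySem

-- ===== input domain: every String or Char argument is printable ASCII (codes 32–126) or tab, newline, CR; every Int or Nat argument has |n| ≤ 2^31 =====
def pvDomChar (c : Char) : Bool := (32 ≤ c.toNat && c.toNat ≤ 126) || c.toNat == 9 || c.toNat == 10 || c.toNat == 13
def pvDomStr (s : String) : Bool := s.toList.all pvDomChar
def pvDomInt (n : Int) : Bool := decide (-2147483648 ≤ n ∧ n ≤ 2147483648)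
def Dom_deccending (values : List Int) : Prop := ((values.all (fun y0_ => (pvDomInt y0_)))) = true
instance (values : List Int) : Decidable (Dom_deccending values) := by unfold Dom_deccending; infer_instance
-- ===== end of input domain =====

-- B replaces A's quadratic scan-with-backtracking over a mutable copy by a single
-- left-to-right pass with a stack, counting pops while the top is <= the current element.

-- ===== PORT A =====
-- Literal port of A's while loop. i stays a Nat: Python's i starts at 0 and is only
-- decremented when i > 0, so it is always ≥ 0; the guard i < len-1 coincides with
-- Python's (for len = 0, Nat 0-1 = 0 and Python's -1 both make the guard false at i = 0).
-- The match default is unreachable: the guard keeps both indices in range (exact).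
def deccendingLoop (l : List Int) (i : Nat) (error : Int) : Int :=
  if _h : i < l.length - 1 then
    match l[i]?, l[i+1]? with
    | some x, some y =>
      if x > y then
        deccendingLoop l (i+1) error
      else
        deccendingLoop (l.eraseIdx i) (if i > 0 then i - 1 else i) (error + 1)
    | _, _ => error
  else error
termination_by 2 * l.length - i
decreasing_by
  · omega
  · have hi : i < l.length := by omega
    simp only [List.length_eraseIdx, if_pos hi]
    split <;> omega

def deccending (values : List Int) : Int :=
  deccendingLoop values 0 0

-- ===== PORT B =====
-- the inner while loop of Source B: pop while the stack top is <= v, counting pops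
def popCount (st : List Int) (v : Int) (e : Int) : List Int × Int :=
  match st with
  | [] => ([], e)
  | t :: rest => if t ≤ v then popCount rest v (e + 1) else (t :: rest, e)

-- one iteration of Source B's for-loop body (stack head = top)
def pushStep (se : List Int × Int) (v : Int) : List Int × Int :=
  let (st, e) := popCount se.1 v se.2
  (v :: st, e)

def deccending_alt (values : List Int) : Int :=
  (values.foldl pushStep ([], 0)).2

-- ===== PRECONDITION & SPEC =====
def Spec_deccending (values : List Int) (out : Int) : Prop := out = deccending_alt values
instance (values : List Int) (out : Int) : Decidable (Spec_deccending values out) := by unfold Spec_deccending; infer_instance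

-- ===== CLAIM (what is proved, stated in full; the proofs are below) =====
def Claim_equal_deccending : Prop := ∀ (values : List Int), Dom_deccending values → Spec_deccending values (deccending values)

-- ===== LEMMAS AND PROOFS =====

theorem eraseIdx_append_len (xs : List Int) (y : Int) (ys : List Int) :
    (xs ++ y :: ys).eraseIdx xs.length = xs ++ ys := by
  induction xs with
  | nil => simp
  | cons a t ih => simpa [List.eraseIdx] using ih

theorem getElem?_append_len (xs : List Int) (y : Int) (ys : List Int) :
    (xs ++ y :: ys)[xs.length]? = some y := by
  rw [List.getElem?_append_right (Nat.le_refl _)]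
  simp

-- one iteration of A's loop, seen at the boundary between the confirmed prefix p and the rest
theorem loop_step (p : List Int) (a v : Int) (r : List Int) (e : Int) :
    deccendingLoop (p ++ a :: v :: r) p.length e =
      if a > v then deccendingLoop (p ++ a :: v :: r) (p.length + 1) e
      else deccendingLoop (p ++ v :: r) (if p.length > 0 then p.length - 1 else p.length) (e + 1) := by
  have hlen : (p ++ a :: v :: r).length = p.length + (r.length + 1 + 1) := by
    rw [List.length_append, List.length_cons, List.length_cons]
  have h2 : (p ++ a :: v :: r)[p.length + 1]? = some v := by
    have := getElem?_append_len (p ++ [a]) v r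
    simp only [List.append_assoc, List.length_append, List.length_cons, List.length_nil, List.singleton_append] at this
    simpa using this
  rw [deccendingLoop, dif_pos (by omega), getElem?_append_len p a (v :: r), h2,
    eraseIdx_append_len p a (v :: r)]

-- Loop correspondence: A's state (new_list, i, error), with the already-confirmed
-- prefix new_list[0..i] kept as B's stack st (head = top), is st.reverse ++ rest.
theorem key (r : List Int) : ∀ (st : List Int) (e : Int), st ≠ [] →
    deccendingLoop (st.reverse ++ r) (st.length - 1) e = (r.foldl pushStep (st, e)).2 := by
  induction r with
  | nil =>
    intro st e _
    rw [deccendingLoop]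
    simp
  | cons v r' IH =>
    intro st e hst
    revert hst
    induction st generalizing e with
    | nil => intro hst; exact absurd rfl hst
    | cons a st' IHst =>
      intro _
      rcases st' with _ | ⟨b, st''⟩
      · -- stack = [a]
        rw [show ((a :: ([] : List Int)).reverse ++ v :: r') = ([] : List Int) ++ a :: v :: r' from rfl,
          show ((a :: ([] : List Int)).length - 1) = ([] : List Int).length from rfl,
          loop_step]
        by_cases hav : a > v
        · rw [if_pos hav]
          have h := IH (v :: a :: []) e (by simp)
          simpa [pushStep, popCount, not_le.mpr hav] using h
        · rw [if_neg hav]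
          have h := IH ([v]) (e + 1) (by simp)
          simpa [pushStep, popCount, not_lt.mp hav] using h
      · -- stack = a :: b :: st''
        rw [show ((a :: b :: st'').reverse ++ v :: r') = (b :: st'').reverse ++ a :: v :: r' by simp,
          show ((a :: b :: st'').length - 1) = ((b :: st'').reverse).length by simp,
          loop_step]
        by_cases hav : a > v
        · rw [if_pos hav]
          have h := IH (v :: a :: b :: st'') e (by simp)
          simpa [pushStep, popCount, not_le.mpr hav, Nat.add_sub_cancel] using h
        · rw [if_neg hav]
          rw [if_pos (by simp : ((b :: st'').reverse).length > 0), List.length_reverse]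
          rw [IHst (e + 1) (by simp)]
          simp [pushStep, popCount, not_lt.mp hav]

theorem deccending_eq_alt (values : List Int) : deccending values = deccending_alt values := by
  match values with
  | [] =>
    rw [deccending, deccendingLoop]
    simp [deccending_alt]
  | v :: r =>
    have h := key r [v] 0 (by simp)
    simp only [List.reverse_cons, List.reverse_nil, List.nil_append, List.singleton_append,
      List.length_cons, List.length_nil, Nat.sub_self] at h
    rw [deccending, h]
    simp [deccending_alt, pushStep, popCount]

-- ===== VERDICT (by name: the statement is the Claim_ definition above) =====
theorem deccending_spec : Claim_equal_deccending := by
  intro values _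
  unfold Spec_deccending
  exact deccending_eq_alt values
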